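-- pv_equiv track=rewrite | github.com/lucidsoftware/lucid-programming-competition-2024 | problems/DanceCompetition/solutions/python3/ai.py | find_copiers
-- ===== SOURCE A (Python) =====
-- def find_copiers(D, N, dancers):
--     subarray_map = {}  # This maps subarrays to the dancers who have them
--     copiers = set()
--
--     for dancer_name, moves in dancers.items():
--         # Generate all subarrays of length N
--         for i in range(len(moves) - N + 1):
--             subarray = tuple(moves[i:i + N])
--             if subarray in subarray_map:
--                 # If subarray exists, add both current dancer and the existing dancers to copiers
--                 subarray_map[subarray].add(dancer_name)
--             else:
--                 # Otherwise, initialize the set of dancers for this subarray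
--                 subarray_map[subarray] = {dancer_name}
--
--     # Find all dancers who share subarrays with others
--     for dancer_set in subarray_map.values():
--         if len(dancer_set) > 1:  # Only consider subarrays shared by more than one dancer
--             copiers.update(dancer_set)
--
--     return len(copiers)
-- ===== SOURCE B (Python) =====
-- def find_copiers(D, N, dancers):
--     # Pass 1: owner[w] = the unique dancer owning window w, or None once a
--     # second distinct dancer has produced w ("shared" sentinel).
--     owner = {}
--     for name, moves in dancers.items():
--         for i in range(len(moves) - N + 1):
--             w = tuple(moves[i:i + N])
--             prev = owner.setdefault(w, name)
--             if prev != name: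
--                 owner[w] = None
--     # Pass 2: count dancers having at least one shared window.
--     count = 0
--     for name, moves in dancers.items():
--         if any(owner.get(tuple(moves[i:i + N])) is None
--                for i in range(len(moves) - N + 1)):
--             count += 1
--     return count
-- ===== Notes on version B (the rewrite author's own statement) =====
-- stated objective: alternative
-- what changed: A builds a dict mapping each length-N window to the SET of dancer names holding it and finally unions all sets of size >= 2; B instead keeps a single owner-or-shared sentinel per window in one dict and then counts, in a second pass over the dancers, those having at least one shared window (short-circuiting on the first hit), with no set objects or unions at all.
import Mathlib
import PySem

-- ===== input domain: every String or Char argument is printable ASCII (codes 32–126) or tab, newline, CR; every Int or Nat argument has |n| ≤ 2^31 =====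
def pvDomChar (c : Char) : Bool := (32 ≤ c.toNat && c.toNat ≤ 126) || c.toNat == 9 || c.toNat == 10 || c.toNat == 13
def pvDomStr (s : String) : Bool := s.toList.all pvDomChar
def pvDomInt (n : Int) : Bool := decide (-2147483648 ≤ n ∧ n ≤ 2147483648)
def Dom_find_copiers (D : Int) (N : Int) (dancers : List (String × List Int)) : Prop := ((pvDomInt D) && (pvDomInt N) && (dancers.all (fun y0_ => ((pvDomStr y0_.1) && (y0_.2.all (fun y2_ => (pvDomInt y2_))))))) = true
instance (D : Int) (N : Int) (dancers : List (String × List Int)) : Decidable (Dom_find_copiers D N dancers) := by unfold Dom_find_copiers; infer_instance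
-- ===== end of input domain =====

-- B replaces A's dict of per-window name-sets (unioned at the end) by a single
-- owner dict with a "shared" sentinel plus a second counting pass over the dancers
-- (an alternative decomposition, similar cost); return values agree on all inputs.

-- ===== PORT A =====
def find_copiers (D : Int) (N : Int) (dancers : List (String × List Int)) : Int :=
  let items := (PySem.Dict.ofList dancers).items
  let subarray_map : PySem.Dict (List Int) (PySem.Set String) :=
    items.foldl (fun m p =>
      (PySem.List.pyRange 0 ((p.2.length : Int) - N + 1) 1).foldl (fun m i =>
        let subarray := PySem.List.slice p.2 (some i) (some (i + N))
        if m.contains subarray then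
          m.modify subarray PySem.Set.empty (fun s => PySem.Set.add s p.1)
        else
          m.insert subarray (PySem.Set.add PySem.Set.empty p.1)) m) PySem.Dict.empty
  let copiers : PySem.Set String :=
    subarray_map.values.foldl (fun c s =>
      if 1 < PySem.Set.len s then PySem.Set.update c s else c) PySem.Set.empty
  PySem.Set.len copiers

-- ===== PORT B =====
def find_copiers_alt (D : Int) (N : Int) (dancers : List (String × List Int)) : Int :=
  let items := (PySem.Dict.ofList dancers).items
  let owner : PySem.Dict (List Int) (Option String) :=
    items.foldl (fun o p =>
      (PySem.List.pyRange 0 ((p.2.length : Int) - N + 1) 1).foldl (fun o i =>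
        let w := PySem.List.slice p.2 (some i) (some (i + N))
        let o' := o.setdefault w (some p.1)
        let prev := o'.getD w none
        if prev ≠ some p.1 then o'.insert w none else o') o) PySem.Dict.empty
  items.foldl (fun c p =>
    if (PySem.List.pyRange 0 ((p.2.length : Int) - N + 1) 1).any (fun i =>
        (owner.getD (PySem.List.slice p.2 (some i) (some (i + N))) none).isNone)
    then c + 1 else c) 0


-- ===== PRECONDITION & SPEC =====
def Spec_find_copiers (D : Int) (N : Int) (dancers : List (String × List Int)) (out : Int) : Prop := out = find_copiers_alt D N dancers
instance (D : Int) (N : Int) (dancers : List (String × List Int)) (out : Int) : Decidable (Spec_find_copiers D N dancers out) := by unfold Spec_find_copiers; infer_instance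

-- ===== CLAIM (what is proved, stated in full; the proofs are below) =====
def Claim_equal_find_copiers : Prop := ∀ (D : Int) (N : Int) (dancers : List (String × List Int)), Dom_find_copiers D N dancers → Spec_find_copiers D N dancers (find_copiers D N dancers)

-- ===== LEMMAS AND PROOFS =====

def pvStepA (name : String) (m : PySem.Dict (List Int) (PySem.Set String)) (w : List Int) :
    PySem.Dict (List Int) (PySem.Set String) :=
  if m.contains w then m.modify w PySem.Set.empty (fun s => PySem.Set.add s name)
  else m.insert w (PySem.Set.add PySem.Set.empty name)

theorem pvStepA_getD (name : String) (m : PySem.Dict (List Int) (PySem.Set String))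
    (v w : List Int) :
    (pvStepA name m v).getD w PySem.Set.empty =
      if w = v then PySem.Set.add (m.getD w PySem.Set.empty) name
      else m.getD w PySem.Set.empty := by
  unfold pvStepA
  by_cases hw : w = v
  · subst hw
    by_cases hc : m.contains w
    · simp [hc, PySem.Dict.getD_modify]
    · simp only [hc, Bool.false_eq_true, if_false, PySem.Dict.getD_insert, if_pos rfl,
        PySem.Dict.getD_of_not_contains m PySem.Set.empty (by simpa using hc)]
  · by_cases hc : m.contains v
    · simp [hc, PySem.Dict.getD_modify, hw]
    · simp [hc, PySem.Dict.getD_insert, hw]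

theorem pvStepA_keys (name : String) (m : PySem.Dict (List Int) (PySem.Set String))
    (v : List Int) : (pvStepA name m v).keys = PySem.Set.add m.keys v := by
  unfold pvStepA
  by_cases hc : m.contains v
  · rw [if_pos hc, PySem.Dict.keys_modify, PySem.Dict.keys_insert_of_contains m _ hc,
      PySem.Set.add_of_mem ((PySem.Dict.contains_iff_mem_keys m v).1 hc)]
  · rw [if_neg (by simp [hc]), PySem.Dict.keys_insert_of_not_contains m _ (by simpa using hc),
      PySem.Set.add_of_not_mem (fun h => hc ((PySem.Dict.contains_iff_mem_keys m v).2 h))]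

def pvCombine (old : Option (Option String)) (name : String) : Option String :=
  match old with
  | none => some name
  | some v => if v = some name then some name else none

def pvStepB (name : String) (o : PySem.Dict (List Int) (Option String)) (w : List Int) :
    PySem.Dict (List Int) (Option String) :=
  let o' := o.setdefault w (some name)
  let prev := o'.getD w none
  if prev ≠ some name then o'.insert w none else o'

theorem pvStepB_get? (name : String) (o : PySem.Dict (List Int) (Option String))
    (v w : List Int) :
    (pvStepB name o v).get? w =
      if w = v then some (pvCombine (o.get? v) name) else o.get? w := by
  unfold pvStepB
  by_cases hc : o.contains v
  · obtain ⟨u, h⟩ : ∃ u, o.get? v = some u :=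
      Option.isSome_iff_exists.1 (by rw [← PySem.Dict.contains_eq_isSome_get?]; exact hc)
    rw [PySem.Dict.setdefault_of_contains o _ hc]
    simp only [PySem.Dict.getD_eq_get?_getD, h, Option.getD_some, pvCombine]
    by_cases hu : u = some name
    · subst hu
      simp only [ne_eq, not_true_eq_false, if_false, if_pos rfl]
      by_cases hw : w = v <;> simp [hw, h]
    · simp only [ne_eq, hu, not_false_eq_true, if_true, PySem.Dict.get?_insert, if_neg hu]
      by_cases hw : w = v <;> simp [hw, h]
  · have hget : o.get? v = none := by
      rcases h : o.get? v with _ | u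
      · rfl
      · simp [PySem.Dict.contains_eq_isSome_get?, h] at hc
    rw [PySem.Dict.setdefault_of_not_contains o _ (by simpa using hc)]
    simp only [PySem.Dict.getD_eq_get?_getD, PySem.Dict.get?_insert, if_pos rfl,
      Option.getD_some, ne_eq, not_true_eq_false, if_false, hget, pvCombine]
    by_cases hw : w = v <;> simp [hw, hget, PySem.Dict.get?_insert]

def pvWins (N : Int) (mv : List Int) : List (List Int) :=
  (PySem.List.pyRange 0 ((mv.length : Int) - N + 1) 1).map
    (fun i => PySem.List.slice mv (some i) (some (i + N)))

def pvCnt (N : Int) (ds : List (String × List Int)) (w : List Int) : Nat :=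
  ds.countP (fun p => decide (w ∈ pvWins N p.2))

theorem pvAdd_idem {s : PySem.Set String} {x : String} :
    PySem.Set.add (PySem.Set.add s x) x = PySem.Set.add s x :=
  PySem.Set.add_of_mem ((PySem.Set.mem_add s x x).2 (Or.inr rfl))

theorem pvAfold_getD (name : String) (ws : List (List Int)) :
    ∀ (m : PySem.Dict (List Int) (PySem.Set String)) (w : List Int),
    (ws.foldl (pvStepA name) m).getD w PySem.Set.empty =
      if w ∈ ws then PySem.Set.add (m.getD w PySem.Set.empty) name
      else m.getD w PySem.Set.empty := by
  induction ws with
  | nil => intro m w; simp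
  | cons v t ih =>
    intro m w
    rw [List.foldl_cons, ih, pvStepA_getD]
    by_cases hv : w = v
    · subst hv
      by_cases ht : w ∈ t <;> simp [ht, pvAdd_idem]
    · by_cases ht : w ∈ t <;> simp [ht, hv]

theorem pvAfold_keys (name : String) (ws : List (List Int)) :
    ∀ (m : PySem.Dict (List Int) (PySem.Set String)),
    (ws.foldl (pvStepA name) m).keys = PySem.Set.update m.keys ws := by
  induction ws with
  | nil => intro m; simp [PySem.Set.update]
  | cons v t ih =>
    intro m
    rw [List.foldl_cons, ih, pvStepA_keys, PySem.Set.update_cons]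

def pvAOuter (N : Int) (ds : List (String × List Int))
    (m : PySem.Dict (List Int) (PySem.Set String)) : PySem.Dict (List Int) (PySem.Set String) :=
  ds.foldl (fun m p => (pvWins N p.2).foldl (pvStepA p.1) m) m

theorem pvAOuter_getD (N : Int) (ds : List (String × List Int)) :
    ∀ (m : PySem.Dict (List Int) (PySem.Set String)) (w : List Int),
    (pvAOuter N ds m).getD w PySem.Set.empty =
      ds.foldl (fun s p => if w ∈ pvWins N p.2 then PySem.Set.add s p.1 else s)
        (m.getD w PySem.Set.empty) := by
  induction ds with
  | nil => intro m w; rfl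
  | cons p t ih =>
    intro m w
    show (pvAOuter N t _).getD w _ = _
    rw [ih, pvAfold_getD, List.foldl_cons]

theorem pvAOuter_keys (N : Int) (ds : List (String × List Int)) :
    ∀ (m : PySem.Dict (List Int) (PySem.Set String)),
    (pvAOuter N ds m).keys = PySem.Set.update m.keys (ds.flatMap (fun p => pvWins N p.2)) := by
  induction ds with
  | nil => intro m; simp [pvAOuter, PySem.Set.update]
  | cons p t ih =>
    intro m
    show (pvAOuter N t _).keys = _
    rw [ih, pvAfold_keys, List.flatMap_cons, PySem.Set.update_append]

theorem pvFold_if_add (N : Int) (w : List Int) (ds : List (String × List Int)) :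
    ∀ (s : PySem.Set String),
    ds.foldl (fun s p => if w ∈ pvWins N p.2 then PySem.Set.add s p.1 else s) s =
      PySem.Set.update s ((ds.filter (fun p => decide (w ∈ pvWins N p.2))).map Prod.fst) := by
  induction ds with
  | nil => intro s; simp [PySem.Set.update]
  | cons p t ih =>
    intro s
    rw [List.foldl_cons]
    by_cases hp : w ∈ pvWins N p.2
    · simp [hp, ih, List.filter_cons, PySem.Set.update_cons]
    · simp [hp, ih, List.filter_cons]

theorem pvCopiersFold_mem (G : List Int → PySem.Set String) (L : List (List Int)) :
    ∀ (c : PySem.Set String) (n : String),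
    (n ∈ L.foldl (fun c k => if 1 < PySem.Set.len (G k) then PySem.Set.update c (G k) else c) c) ↔
      n ∈ c ∨ ∃ k ∈ L, 1 < PySem.Set.len (G k) ∧ n ∈ G k := by
  induction L with
  | nil => intro c n; simp
  | cons v t ih =>
    intro c n
    rw [List.foldl_cons]
    by_cases hv : 1 < PySem.Set.len (G v)
    · rw [if_pos hv, ih]
      simp only [PySem.Set.mem_update, List.mem_cons]
      constructor
      · rintro ((h | h) | ⟨k, hk, h1, h2⟩)
        · exact Or.inl h
        · exact Or.inr ⟨v, Or.inl rfl, hv, h⟩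
        · exact Or.inr ⟨k, Or.inr hk, h1, h2⟩
      · rintro (h | ⟨k, (rfl | hk), h1, h2⟩)
        · exact Or.inl (Or.inl h)
        · exact Or.inl (Or.inr h2)
        · exact Or.inr ⟨k, hk, h1, h2⟩
    · rw [if_neg hv, ih]
      simp only [List.mem_cons]
      constructor
      · rintro (h | ⟨k, hk, h1, h2⟩)
        · exact Or.inl h
        · exact Or.inr ⟨k, Or.inr hk, h1, h2⟩
      · rintro (h | ⟨k, (rfl | hk), h1, h2⟩)
        · exact Or.inl h
        · exact absurd h1 hv
        · exact Or.inr ⟨k, hk, h1, h2⟩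

theorem pvCopiersFold_nodup (G : List Int → PySem.Set String) (L : List (List Int)) :
    ∀ (c : PySem.Set String), c.Nodup →
    (L.foldl (fun c k => if 1 < PySem.Set.len (G k) then PySem.Set.update c (G k) else c) c).Nodup := by
  induction L with
  | nil => intro c h; exact h
  | cons v t ih =>
    intro c h
    rw [List.foldl_cons]
    by_cases hv : 1 < PySem.Set.len (G v)
    · rw [if_pos hv]; exact ih _ (PySem.Set.nodup_update _ _ h)
    · rw [if_neg hv]; exact ih _ h

theorem pvCombine_combine (x : Option (Option String)) (name : String) :
    pvCombine (some (pvCombine x name)) name = pvCombine x name := by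
  rcases x with _ | u
  · simp [pvCombine]
  · by_cases hu : u = some name <;> simp [pvCombine, hu]

theorem pvBfold_get? (name : String) (ws : List (List Int)) :
    ∀ (o : PySem.Dict (List Int) (Option String)) (w : List Int),
    (ws.foldl (pvStepB name) o).get? w =
      if w ∈ ws then some (pvCombine (o.get? w) name) else o.get? w := by
  induction ws with
  | nil => intro o w; simp
  | cons v t ih =>
    intro o w
    rw [List.foldl_cons, ih, pvStepB_get?]
    by_cases hv : w = v
    · subst hv
      by_cases ht : w ∈ t <;> simp [ht, pvCombine_combine]
    · by_cases ht : w ∈ t <;> simp [ht, hv]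

def pvBOuter (N : Int) (ds : List (String × List Int))
    (o : PySem.Dict (List Int) (Option String)) : PySem.Dict (List Int) (Option String) :=
  ds.foldl (fun o p => (pvWins N p.2).foldl (pvStepB p.1) o) o

theorem pvBOuter_get? (N : Int) (ds : List (String × List Int)) :
    ∀ (o : PySem.Dict (List Int) (Option String)) (w : List Int),
    (pvBOuter N ds o).get? w =
      ds.foldl (fun s p => if w ∈ pvWins N p.2 then some (pvCombine s p.1) else s) (o.get? w) := by
  induction ds with
  | nil => intro o w; rfl
  | cons p t ih =>
    intro o w
    show (pvBOuter N t _).get? w = _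
    rw [ih, pvBfold_get?, List.foldl_cons]

def pvScan (N : Int) (w : List Int) (ds : List (String × List Int))
    (s : Option (Option String)) : Option (Option String) :=
  ds.foldl (fun s p => if w ∈ pvWins N p.2 then some (pvCombine s p.1) else s) s

theorem pvScan_cons (N : Int) (w : List Int) (p : String × List Int)
    (t : List (String × List Int)) (s : Option (Option String)) :
    pvScan N w (p :: t) s =
      pvScan N w t (if w ∈ pvWins N p.2 then some (pvCombine s p.1) else s) := by
  unfold pvScan
  rw [List.foldl_cons]

theorem pvCombine_some_none (name : String) : pvCombine (some none) name = none := by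
  simp [pvCombine]

theorem pvScan_some_none (N : Int) (w : List Int) (ds : List (String × List Int)) :
    pvScan N w ds (some none) = some none := by
  induction ds with
  | nil => rfl
  | cons p t ih =>
    rw [pvScan_cons]
    by_cases hp : w ∈ pvWins N p.2
    · rw [if_pos hp, pvCombine_some_none, ih]
    · rw [if_neg hp, ih]

theorem pvScan_some_some (N : Int) (w : List Int) (n : String) (ds : List (String × List Int))
    (h : ∀ p ∈ ds, p.1 ≠ n) :
    pvScan N w ds (some (some n)) =
      if pvCnt N ds w = 0 then some (some n) else some none := by
  induction ds with
  | nil => rfl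
  | cons p t ih =>
    rw [pvScan_cons]
    by_cases hp : w ∈ pvWins N p.2
    · have hne : pvCombine (some (some n)) p.1 = none := by
        have : ¬ (some n : Option String) = some p.1 := by
          simp [(h p (by simp)).symm]
        simp [pvCombine, this]
      rw [if_pos hp, hne, pvScan_some_none]
      have : pvCnt N (p :: t) w ≠ 0 := by
        simp [pvCnt, List.countP_cons, hp]
      rw [if_neg this]
    · rw [if_neg hp, ih (fun q hq => h q (by simp [hq]))]
      have : pvCnt N (p :: t) w = pvCnt N t w := by
        simp [pvCnt, List.countP_cons, hp]
      rw [this]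

theorem pvScan_none (N : Int) (w : List Int) (ds : List (String × List Int))
    (hnd : (ds.map Prod.fst).Nodup) :
    ((pvScan N w ds none).getD none = none ↔ pvCnt N ds w ≠ 1) := by
  induction ds with
  | nil => simp [pvScan, pvCnt]
  | cons p t ih =>
    rw [List.map_cons, List.nodup_cons] at hnd
    rw [pvScan_cons]
    by_cases hp : w ∈ pvWins N p.2
    · rw [if_pos hp, show pvCombine none p.1 = some p.1 from rfl,
        pvScan_some_some N w p.1 t
          (fun q hq hqe => hnd.1 (hqe ▸ List.mem_map_of_mem hq))]
      have hcnt : pvCnt N (p :: t) w = pvCnt N t w + 1 := by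
        simp [pvCnt, List.countP_cons, hp]
      by_cases h0 : pvCnt N t w = 0
      · rw [if_pos h0]; simp [hcnt, h0]
      · rw [if_neg h0]; simp [hcnt]; omega
    · rw [if_neg hp, ih hnd.2]
      have : pvCnt N (p :: t) w = pvCnt N t w := by
        simp [pvCnt, List.countP_cons, hp]
      rw [this]

abbrev pvPred (N : Int) (ds : List (String × List Int)) (p : String × List Int) : Prop :=
  ∃ w ∈ pvWins N p.2, 2 ≤ pvCnt N ds w

def pvNames (N : Int) (ds : List (String × List Int)) (w : List Int) : List String :=
  (ds.filter (fun p => decide (w ∈ pvWins N p.2))).map Prod.fst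

theorem pvNames_nodup (N : Int) (ds : List (String × List Int)) (w : List Int)
    (hnd : (ds.map Prod.fst).Nodup) : (pvNames N ds w).Nodup :=
  hnd.sublist ((ds.filter_sublist ).map Prod.fst)

theorem pvNames_length (N : Int) (ds : List (String × List Int)) (w : List Int) :
    (pvNames N ds w).length = pvCnt N ds w := by
  rw [pvNames, List.length_map, pvCnt, List.countP_eq_length_filter]

theorem pvG_eq (N : Int) (ds : List (String × List Int)) (w : List Int)
    (hnd : (ds.map Prod.fst).Nodup) :
    (pvAOuter N ds PySem.Dict.empty).getD w PySem.Set.empty = pvNames N ds w := by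
  rw [pvAOuter_getD, PySem.Dict.getD_empty, pvFold_if_add]
  show PySem.Set.update [] _ = _
  rw [PySem.Set.update_nil_left]
  exact PySem.Set.ofList_eq_self_of_nodup _ (pvNames_nodup N ds w hnd)

theorem pvA_main (N : Int) (ds : List (String × List Int))
    (hnd : (ds.map Prod.fst).Nodup) :
    PySem.Set.len (((pvAOuter N ds PySem.Dict.empty).values).foldl
        (fun c s => if 1 < PySem.Set.len s then PySem.Set.update c s else c) PySem.Set.empty) =
      ((ds.countP (fun p => decide (pvPred N ds p)) : Nat) : Int) := by
  have hkeys : (pvAOuter N ds PySem.Dict.empty).keys =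
      PySem.Set.ofList (ds.flatMap (fun p => pvWins N p.2)) := by
    rw [pvAOuter_keys, PySem.Dict.keys_empty, PySem.Set.update_nil_left]
  have hknd : (pvAOuter N ds PySem.Dict.empty).keys.Nodup := by
    rw [hkeys]; exact PySem.Set.nodup_ofList _
  rw [PySem.Dict.values_eq_map_keys _ hknd PySem.Set.empty, List.foldl_map]
  set G : List Int → PySem.Set String :=
    fun k => (pvAOuter N ds PySem.Dict.empty).getD k PySem.Set.empty with hG
  set copiers := (pvAOuter N ds PySem.Dict.empty).keys.foldl
    (fun c k => if 1 < PySem.Set.len (G k) then PySem.Set.update c (G k) else c)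
    PySem.Set.empty with hcop
  set Z := (ds.filter (fun p => decide (pvPred N ds p))).map Prod.fst with hZ
  have hmemG : ∀ (k : List Int) (n : String), n ∈ G k ↔
      ∃ p ∈ ds, k ∈ pvWins N p.2 ∧ p.1 = n := by
    intro k n
    show n ∈ (pvAOuter N ds PySem.Dict.empty).getD k PySem.Set.empty ↔ _
    rw [pvG_eq N ds k hnd, pvNames]
    simp only [List.mem_map, List.mem_filter, decide_eq_true_eq]
    tauto
  have hlenG : ∀ k : List Int, (1 < PySem.Set.len (G k)) ↔ 2 ≤ pvCnt N ds k := by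
    intro k
    show 1 < PySem.Set.len ((pvAOuter N ds PySem.Dict.empty).getD k PySem.Set.empty) ↔ _
    rw [pvG_eq N ds k hnd, PySem.Set.len_eq, pvNames_length]
    constructor
    · intro h; exact_mod_cast h
    · intro h; exact_mod_cast h
  have hmem : ∀ n, n ∈ copiers ↔ n ∈ Z := by
    intro n
    rw [hcop, pvCopiersFold_mem, hZ]
    simp only [List.mem_map, List.mem_filter]
    constructor
    · rintro (h | ⟨k, _, h1, h2⟩)
      · cases h
      · obtain ⟨p, hp, hkp, rfl⟩ := (hmemG k n).1 h2
        exact ⟨p, ⟨hp, decide_eq_true ⟨k, hkp, (hlenG k).1 h1⟩⟩, rfl⟩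
    · rintro ⟨p, ⟨hp, hpred⟩, rfl⟩
      obtain ⟨k, hkp, hcnt⟩ := of_decide_eq_true hpred
      refine Or.inr ⟨k, ?_, (hlenG k).2 hcnt, (hmemG k p.1).2 ⟨p, hp, hkp, rfl⟩⟩
      rw [hkeys]
      exact (PySem.Set.mem_ofList _ _).2 (List.mem_flatMap.2 ⟨p, hp, hkp⟩)
  have hndc : copiers.Nodup := pvCopiersFold_nodup G _ PySem.Set.empty List.nodup_nil
  have hndZ : Z.Nodup := hnd.sublist ((ds.filter_sublist).map Prod.fst)
  have hperm : copiers.Perm Z := (List.perm_ext_iff_of_nodup hndc hndZ).2 hmem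
  rw [PySem.Set.len_eq, hperm.length_eq, hZ, List.length_map, List.countP_eq_length_filter]

theorem pvB_main (N : Int) (ds : List (String × List Int))
    (hnd : (ds.map Prod.fst).Nodup) :
    ds.foldl (fun (c : Int) p =>
        if (pvWins N p.2).any (fun w =>
            ((pvBOuter N ds PySem.Dict.empty).getD w none).isNone) then c + 1 else c) 0 =
      ((ds.countP (fun p => decide (pvPred N ds p)) : Nat) : Int) := by
  rw [PySem.List.foldl_count_if, zero_add]
  have hcond : ∀ p ∈ ds, ∀ w ∈ pvWins N p.2,
      ((pvBOuter N ds PySem.Dict.empty).getD w none).isNone = decide (2 ≤ pvCnt N ds w) := by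
    intro p hp w hw
    have h1 : 1 ≤ pvCnt N ds w := by
      have : 0 < ds.countP (fun q => decide (w ∈ pvWins N q.2)) :=
        List.countP_pos_iff.2 ⟨p, hp, decide_eq_true hw⟩
      exact this
    rw [PySem.Dict.getD_eq_get?_getD, pvBOuter_get?, PySem.Dict.get?_empty]
    have hch := pvScan_none N w ds hnd
    rw [show (ds.foldl (fun s p => if w ∈ pvWins N p.2 then some (pvCombine s p.1) else s)
        (none : Option (Option String))) = pvScan N w ds none from rfl]
    by_cases h2 : 2 ≤ pvCnt N ds w
    · have hx : (pvScan N w ds none).getD none = none := hch.2 (by omega)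
      simp [hx, h2]
    · have hx : ¬ ((pvScan N w ds none).getD none = none) := by
        rw [hch]; omega
      rcases hu : (pvScan N w ds none).getD none with _ | u
      · exact absurd hu hx
      · simp [h2]
  congr 1
  apply List.countP_congr
  intro p hp
  have hval : ((pvWins N p.2).any fun w =>
      ((pvBOuter N ds PySem.Dict.empty).getD w none).isNone) = decide (pvPred N ds p) := by
    by_cases hpred : pvPred N ds p
    · rw [decide_eq_true hpred]
      obtain ⟨w, hw, hcnt⟩ := hpred
      exact List.any_eq_true.2 ⟨w, hw, by rw [hcond p hp w hw]; exact decide_eq_true hcnt⟩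
    · rw [decide_eq_false hpred]
      refine List.any_eq_false.2 ?_
      intro w hw
      rw [hcond p hp w hw]
      simp only [decide_eq_true_eq]
      intro hc
      exact hpred ⟨w, hw, hc⟩
  rw [hval]
theorem pvPorts_agree (D N : Int) (dancers : List (String × List Int)) :
    find_copiers D N dancers = find_copiers_alt D N dancers := by
  have hnd : ((PySem.Dict.ofList dancers).items.map Prod.fst).Nodup := by
    simpa [PySem.Dict.keys] using
      PySem.Dict.nodup_keys_ofList (κ := String) (ν := List Int) dancers
  have hfunA : (fun (m : PySem.Dict (List Int) (PySem.Set String)) (p : String × List Int) =>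
      (PySem.List.pyRange 0 ((p.2.length : Int) - N + 1) 1).foldl (fun m i =>
        let subarray := PySem.List.slice p.2 (some i) (some (i + N))
        if m.contains subarray then m.modify subarray PySem.Set.empty (fun s => PySem.Set.add s p.1)
        else m.insert subarray (PySem.Set.add PySem.Set.empty p.1)) m)
      = fun m p => (pvWins N p.2).foldl (pvStepA p.1) m := by
    funext m p
    rw [pvWins, List.foldl_map]
    rfl
  have hfunB : (fun (o : PySem.Dict (List Int) (Option String)) (p : String × List Int) =>
      (PySem.List.pyRange 0 ((p.2.length : Int) - N + 1) 1).foldl (fun o i =>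
        let w := PySem.List.slice p.2 (some i) (some (i + N))
        let o' := o.setdefault w (some p.1)
        let prev := o'.getD w none
        if prev ≠ some p.1 then o'.insert w none else o') o)
      = fun o p => (pvWins N p.2).foldl (pvStepB p.1) o := by
    funext o p
    rw [pvWins, List.foldl_map]
    rfl
  have hAny : ∀ (owner : PySem.Dict (List Int) (Option String)) (p : String × List Int),
      ((PySem.List.pyRange 0 ((p.2.length : Int) - N + 1) 1).any (fun i =>
        (owner.getD (PySem.List.slice p.2 (some i) (some (i + N))) none).isNone))
      = (pvWins N p.2).any (fun w => (owner.getD w none).isNone) := by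
    intro owner p
    rw [pvWins, List.any_map]
    rfl
  simp only [find_copiers, find_copiers_alt]
  rw [hfunA, hfunB]
  simp only [hAny]
  show PySem.Set.len
      (((pvAOuter N ((PySem.Dict.ofList dancers).items) PySem.Dict.empty).values).foldl
        (fun c s => if 1 < PySem.Set.len s then PySem.Set.update c s else c) PySem.Set.empty)
    = ((PySem.Dict.ofList dancers).items).foldl (fun (c : Int) p =>
        if (pvWins N p.2).any (fun w =>
          ((pvBOuter N ((PySem.Dict.ofList dancers).items) PySem.Dict.empty).getD w none).isNone)
        then c + 1 else c) 0
  rw [pvA_main N _ hnd, pvB_main N _ hnd]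

-- ===== VERDICT (by name: the statement is the Claim_ definition above) =====
theorem find_copiers_spec : Claim_equal_find_copiers := by
  intro D N dancers _
  exact pvPorts_agree D N dancers
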